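-- pv_equiv track=rewrite | github.com/Marvan-IT/ADAPTIVE-LEARNER | backend/src/graph/dependency_builder.py | _remove_transitive_edges
-- ===== SOURCE A (Python) =====
-- def _remove_transitive_edges(prereq_map: dict) -> dict:
--     """Remove edges that are already implied by transitivity."""
--     def _all_ancestors(node, memo=None):
--         if memo is None:
--             memo = {}
--         if node in memo:
--             return memo[node]
--         ancestors = set()
--         for p in prereq_map.get(node, []):
--             ancestors.add(p)
--             ancestors |= _all_ancestors(p, memo)
--         memo[node] = ancestors
--         return ancestors
--
--     memo = {}
--     cleaned = {}
--     for node, prereqs in prereq_map.items():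
--         direct = []
--         for p in prereqs:
--             # Check if p is already reachable through other prerequisites
--             other_prereqs = [op for op in prereqs if op != p]
--             reachable_through_others = set()
--             for op in other_prereqs:
--                 reachable_through_others |= _all_ancestors(op, memo)
--                 reachable_through_others.add(op)
--             if p not in reachable_through_others:
--                 direct.append(p)
--         cleaned[node] = sorted(direct)
--     return cleaned
-- ===== SOURCE B (Python) =====
-- def _remove_transitive_edges(prereq_map: dict) -> dict:
--     """Remove edges already implied by transitivity, via iterated edge expansion
--     to a fixed point (no recursion, no memo)."""
--     n = sum(len(v) for v in prereq_map.values())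
--
--     def reach(q):
--         r = set(prereq_map.get(q, []))
--         for _ in range(n):
--             new = {x for f in r for x in prereq_map.get(f, [])} - r
--             if not new:
--                 break
--             r |= new
--         return r
--
--     cleaned = {}
--     for node, prereqs in prereq_map.items():
--         implied = set()
--         for q in prereqs:
--             implied |= reach(q)
--         cleaned[node] = sorted(p for p in prereqs if p not in implied)
--     return cleaned
-- ===== Notes on version B (the rewrite author's own statement) =====
-- stated objective: alternative
-- what changed: A computes ancestor sets by memoized recursion and, for every prerequisite p of a node, re-unions the ancestor sets of all the OTHER prerequisites (k nested scans per node); B has no recursion and no memo: it computes each prerequisite's reachable set by iterating the edge-expansion step to a fixed point (bounded by the total edge count, with early exit), takes one union per node and keeps p iff p is absent from it (valid on acyclic graphs, where p never reaches itself). …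
-- outside the precondition, e.g. on _remove_transitive_edges({'a': ['a']}): A returns {'a': ['a']}, B returns {'a': []}; on _remove_transitive_edges({'a': ['b'], 'b': ['a']}): A returns {'a': ['b'], 'b': ['a']}, B returns {'a': [], 'b': []}; on _remove_transitive_edges({'a': ['b', 'c'], 'b': ['a']}): A raises RecursionError, B returns {'a': [], 'b': []}
import Mathlib
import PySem

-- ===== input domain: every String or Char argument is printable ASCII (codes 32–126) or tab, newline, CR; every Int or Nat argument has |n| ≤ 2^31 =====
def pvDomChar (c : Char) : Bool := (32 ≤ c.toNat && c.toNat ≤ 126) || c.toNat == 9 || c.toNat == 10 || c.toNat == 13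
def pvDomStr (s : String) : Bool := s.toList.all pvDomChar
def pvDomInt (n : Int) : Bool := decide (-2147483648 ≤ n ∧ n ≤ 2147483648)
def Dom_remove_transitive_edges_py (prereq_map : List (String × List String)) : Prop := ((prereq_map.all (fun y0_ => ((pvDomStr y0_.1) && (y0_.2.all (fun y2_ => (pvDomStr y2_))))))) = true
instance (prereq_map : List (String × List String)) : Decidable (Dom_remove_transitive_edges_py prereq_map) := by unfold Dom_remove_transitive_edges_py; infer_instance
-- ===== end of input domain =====

-- B replaces A's memoized recursive ancestor computation and its per-prerequisite union over all
-- OTHER prerequisites by a recursion-free fixed-point edge expansion per prerequisite and a single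
-- union per node (objective: alternative; equal on acyclic maps, stated by Pre_).

-- prereq_map.get(node, []) — shared helper (the same dict lookup appears in both Pythons)
def pvEdges (g : List (String × List String)) (node : String) : List String :=
  (PySem.Dict.mk g).getD node []

-- ===== PORT A =====
-- the nested helper _all_ancestors(node, memo) of A; fuel only bounds the recursion depth:
-- under Pre_ (acyclic graph) the depth is < g.length + 1, the fuel the port passes.
def pvAllAncestors (g : List (String × List String)) :
    Nat → PySem.Dict String (PySem.Set String) → String →
    PySem.Set String × PySem.Dict String (PySem.Set String)
  | fuel, memo, node =>
    match memo.get? node with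
    | some s => (s, memo)                   -- if node in memo: return memo[node]
    | none =>
      match fuel with
      | 0 => (PySem.Set.empty, memo)        -- unreachable under Pre_
      | f + 1 =>
        -- ancestors = set(); for p in …: ancestors.add(p); ancestors |= _all_ancestors(p, memo)
        let r := (pvEdges g node).foldl
          (fun (st : PySem.Set String × PySem.Dict String (PySem.Set String)) p =>
            let anc1 := PySem.Set.add st.1 p
            let res := pvAllAncestors g f st.2 p
            (PySem.Set.union anc1 res.1, res.2))
          (PySem.Set.empty, memo)
        (r.1, r.2.insert node r.1)          -- memo[node] = ancestors

def remove_transitive_edges_py (prereq_map : List (String × List String)) : List (String × List String) :=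
  let fuel := prereq_map.length + 1
  let st := prereq_map.foldl
    (fun (st : PySem.Dict String (PySem.Set String) × PySem.Dict String (List String)) kv =>
      let node := kv.1
      let prereqs := kv.2
      -- direct = []; for p in prereqs: …
      let inner := prereqs.foldl
        (fun (st2 : List String × PySem.Dict String (PySem.Set String)) p =>
          let other := prereqs.filter (fun op => op != p)
          -- reachable_through_others = set(); for op in other_prereqs: reachable |= _all_ancestors(op, memo); reachable.add(op)
          let r := other.foldl
            (fun (st3 : PySem.Set String × PySem.Dict String (PySem.Set String)) op =>
              let res := pvAllAncestors prereq_map fuel st3.2 op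
              (PySem.Set.add (PySem.Set.union st3.1 res.1) op, res.2))
            (PySem.Set.empty, st2.2)
          (if PySem.Set.contains r.1 p then st2.1 else st2.1 ++ [p], r.2))
        ([], st.1)
      (inner.2, st.2.insert node (PySem.List.sorted inner.1 (fun x => x))))
    (PySem.Dict.empty, PySem.Dict.empty)
  st.2.items

-- ===== PORT B =====
-- one expansion step of B's inner loop:
-- 'new = {x for f in r for x in prereq_map.get(f, [])} - r; if not new: break; r |= new'
-- (the break is ported as an identity step: once new is empty it stays empty, so the
--  remaining loop iterations change nothing; the fold computes the same final r)
def pvExpand (g : List (String × List String)) (r : PySem.Set String) : PySem.Set String :=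
  let nw := PySem.Set.diff (PySem.Set.ofList (r.flatMap (pvEdges g))) r
  if nw.isEmpty then r else PySem.Set.union r nw

-- reach(q): r = set(prereq_map.get(q, [])); for _ in range(n): …expansion…
def pvReachFix (g : List (String × List String)) (n : Nat) (q : String) : PySem.Set String :=
  (List.range n).foldl (fun r _ => pvExpand g r) (PySem.Set.ofList (pvEdges g q))

def remove_transitive_edges_py_alt (prereq_map : List (String × List String)) : List (String × List String) :=
  -- n = sum(len(v) for v in prereq_map.values())
  let n := (prereq_map.map (fun kv => kv.2.length)).sum
  -- cleaned = {}; for node, prereqs in …: implied = set(); for q in prereqs: implied |= reach(q); cleaned[node] = sorted(…)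
  (prereq_map.foldl
    (fun (cleaned : PySem.Dict String (List String)) kv =>
      let implied := kv.2.foldl
        (fun (s : PySem.Set String) q => PySem.Set.union s (pvReachFix prereq_map n q))
        PySem.Set.empty
      cleaned.insert kv.1
        (PySem.List.sorted (kv.2.filter (fun p => !(PySem.Set.contains implied p))) (fun x => x)))
    PySem.Dict.empty).items

-- ===== PRECONDITION & SPEC =====
-- everything reachable in 1..n+1 edge steps from a (monotone closure iteration)
def pvReachN (g : List (String × List String)) : Nat → String → List String
  | 0, a => pvEdges g a
  | n + 1, a => pvReachN g n a ++ (pvReachN g n a).flatMap (pvEdges g)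

-- Pre_ excludes prerequisite maps whose graph contains a cycle: there A usually overflows the recursion
-- stack (RecursionError), and when every cycle node happens to be a sole prerequisite A returns an
-- accidental unreduced value that exists only because its inner loop skips singleton prerequisite lists;
-- B's fixed-point expansion terminates there and returns the reduced map.
def Pre_remove_transitive_edges_py (prereq_map : List (String × List String)) : Prop :=
  ∀ kv ∈ prereq_map, kv.1 ∉ pvReachN prereq_map (prereq_map.flatMap (fun kv => kv.2)).length kv.1

instance (prereq_map : List (String × List String)) : Decidable (Pre_remove_transitive_edges_py prereq_map) := by
  unfold Pre_remove_transitive_edges_py; infer_instance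

def pvWitness_remove_transitive_edges_py : (List (String × List String)) :=
  [("b", ["a"]), ("c", ["a", "b"])]

def Spec_remove_transitive_edges_py (prereq_map : List (String × List String)) (out : List (String × List String)) : Prop := out = remove_transitive_edges_py_alt prereq_map
instance (prereq_map : List (String × List String)) (out : List (String × List String)) : Decidable (Spec_remove_transitive_edges_py prereq_map out) := by unfold Spec_remove_transitive_edges_py; infer_instance

-- ===== CLAIM (what is proved, stated in full; the proofs are below) =====
def Claim_equal_remove_transitive_edges_py : Prop := ∀ (prereq_map : List (String × List String)), Dom_remove_transitive_edges_py prereq_map → Pre_remove_transitive_edges_py prereq_map → Spec_remove_transitive_edges_py prereq_map (remove_transitive_edges_py prereq_map)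

-- ===== LEMMAS AND PROOFS =====

-- one edge of the prerequisite graph
def pvEdge (g : List (String × List String)) (a b : String) : Prop := b ∈ pvEdges g a
-- reachability along ≥ 1 edge
def pvReach (g : List (String × List String)) : String → String → Prop := Relation.TransGen (pvEdge g)
def pvAcyclic (g : List (String × List String)) : Prop := ∀ x, ¬ pvReach g x x
-- every memo entry of A has exactly the reachable-set membership
def pvCoh (g : List (String × List String)) (memo : PySem.Dict String (PySem.Set String)) : Prop :=
  ∀ k s, memo.get? k = some s → ∀ x, (x ∈ s ↔ pvReach g k x)
-- memo keys only grow
def pvMono (m m' : PySem.Dict String (PySem.Set String)) : Prop :=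
  ∀ k, (m.get? k).isSome → (m'.get? k).isSome
-- number of distinct keys of g neither cached in memo nor in avoid
def pvCnt (g : List (String × List String)) (memo : PySem.Dict String (PySem.Set String))
    (avoid : List String) : Nat :=
  (((g.map Prod.fst).dedup).filter (fun k => (memo.get? k).isNone && !(avoid.contains k))).length

-- A's helper's own loop body at remaining fuel f
def pvStepAncFold (g : List (String × List String)) (f : Nat) :
    (PySem.Set String × PySem.Dict String (PySem.Set String)) → String →
    (PySem.Set String × PySem.Dict String (PySem.Set String)) := fun st p =>
  (PySem.Set.union (PySem.Set.add st.1 p) (pvAllAncestors g f st.2 p).1,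
   (pvAllAncestors g f st.2 p).2)

-- A's three loop bodies, named (each is definitionally the lambda in the port)
def pvStepInnerA (g : List (String × List String)) :
    (PySem.Set String × PySem.Dict String (PySem.Set String)) → String →
    (PySem.Set String × PySem.Dict String (PySem.Set String)) := fun st3 op =>
  (PySem.Set.add (PySem.Set.union st3.1 (pvAllAncestors g (g.length + 1) st3.2 op).1) op,
   (pvAllAncestors g (g.length + 1) st3.2 op).2)

def pvStepMidA (g : List (String × List String)) (full : List String) :
    (List String × PySem.Dict String (PySem.Set String)) → String →
    (List String × PySem.Dict String (PySem.Set String)) := fun st2 p =>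
  (if PySem.Set.contains ((full.filter (fun op => op != p)).foldl (pvStepInnerA g) (PySem.Set.empty, st2.2)).1 p
     then st2.1 else st2.1 ++ [p],
   ((full.filter (fun op => op != p)).foldl (pvStepInnerA g) (PySem.Set.empty, st2.2)).2)

def pvStepOuterA (g : List (String × List String)) :
    (PySem.Dict String (PySem.Set String) × PySem.Dict String (List String)) → (String × List String) →
    (PySem.Dict String (PySem.Set String) × PySem.Dict String (List String)) := fun st kv =>
  ((kv.2.foldl (pvStepMidA g kv.2) ([], st.1)).2,
   st.2.insert kv.1 (PySem.List.sorted (kv.2.foldl (pvStepMidA g kv.2) ([], st.1)).1 (fun x => x)))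

-- B's two loop bodies, named
def pvStepImpB (g : List (String × List String)) (n : Nat) :
    PySem.Set String → String → PySem.Set String := fun s q =>
  PySem.Set.union s (pvReachFix g n q)

def pvStepOuterB (g : List (String × List String)) (n : Nat) :
    PySem.Dict String (List String) → (String × List String) → PySem.Dict String (List String) := fun c kv =>
  c.insert kv.1 (PySem.List.sorted
    (kv.2.filter (fun p => !(PySem.Set.contains (kv.2.foldl (pvStepImpB g n) PySem.Set.empty) p)))
    (fun x => x))

-- ---- basic graph facts ----
theorem pvEdges_sub (g : List (String × List String)) (a x : String) (h : x ∈ pvEdges g a) :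
    x ∈ g.flatMap (fun kv => kv.2) := by
  unfold pvEdges PySem.Dict.getD PySem.Dict.get? at h
  cases hf : List.find? (fun p => p.1 == a) (PySem.Dict.mk g).items with
  | none => rw [hf] at h; simp at h
  | some kv =>
    rw [hf] at h; simp at h
    exact List.mem_flatMap.mpr ⟨kv, List.mem_of_find?_eq_some hf, h⟩

theorem pvEdges_key (g : List (String × List String)) (a : String) (h : pvEdges g a ≠ []) :
    ∃ kv ∈ g, kv.1 = a := by
  unfold pvEdges PySem.Dict.getD PySem.Dict.get? at h
  cases hf : List.find? (fun p => p.1 == a) (PySem.Dict.mk g).items with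
  | none => rw [hf] at h; simp at h
  | some kv =>
    refine ⟨kv, List.mem_of_find?_eq_some hf, ?_⟩
    have := List.find?_some hf
    simpa using this

theorem pvEdges_of_not_key (g : List (String × List String)) (a : String)
    (h : ∀ kv ∈ g, kv.1 ≠ a) : pvEdges g a = [] := by
  unfold pvEdges PySem.Dict.getD PySem.Dict.get?
  rw [List.find?_eq_none.mpr]
  · rfl
  · intro kv hkv
    simpa using h kv hkv

theorem pvReach_head_iff (g : List (String × List String)) (node x : String) :
    pvReach g node x ↔ ∃ p, pvEdge g node p ∧ (x = p ∨ pvReach g p x) := by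
  unfold pvReach
  rw [Relation.TransGen.head'_iff]
  refine exists_congr fun b => and_congr_right fun _ => ?_
  rw [Relation.reflTransGen_iff_eq_or_transGen]

theorem pvReach_empty (g : List (String × List String)) (a x : String)
    (h : pvEdges g a = []) : ¬ pvReach g a x := by
  intro hr
  obtain ⟨b, hb, -⟩ := Relation.TransGen.head'_iff.mp hr
  rw [pvEdge, h] at hb
  simp at hb

-- ---- bounded reachability: pvReachN computes pvReach ----
theorem pvReachN_mono_step (g : List (String × List String)) (n : Nat) (a : String) :
    pvReachN g n a ⊆ pvReachN g (n + 1) a := by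
  intro x hx
  simp only [pvReachN, List.mem_append]
  exact Or.inl hx

theorem pvReachN_le (g : List (String × List String)) {n m : Nat} (a : String) (h : n ≤ m) :
    pvReachN g n a ⊆ pvReachN g m a := by
  obtain ⟨k, rfl⟩ := Nat.exists_eq_add_of_le h
  induction k with
  | zero => exact fun x hx => hx
  | succ k ih => exact fun x hx => pvReachN_mono_step g (n + k) a (ih (Nat.le_add_right n k) hx)

theorem pvReach_reachN (g : List (String × List String)) (a x : String) (h : pvReach g a x) :
    ∃ n, x ∈ pvReachN g n a := by
  induction h with
  | single h => exact ⟨0, h⟩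
  | tail _ hbc ih =>
    obtain ⟨n, hn⟩ := ih
    exact ⟨n + 1, by
      simp only [pvReachN, List.mem_append, List.mem_flatMap]
      exact Or.inr ⟨_, hn, hbc⟩⟩

theorem pvReachN_sound (g : List (String × List String)) :
    ∀ (n : Nat) (a x : String), x ∈ pvReachN g n a → pvReach g a x := by
  intro n
  induction n with
  | zero => intro a x h; exact Relation.TransGen.single h
  | succ n ih =>
    intro a x h
    simp only [pvReachN, List.mem_append, List.mem_flatMap] at h
    rcases h with h | ⟨b, hb, hx⟩
    · exact ih a x h
    · exact (ih a b hb).tail hx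

theorem pvReachN_sub_values (g : List (String × List String)) :
    ∀ (n : Nat) (a x : String), x ∈ pvReachN g n a → x ∈ g.flatMap (fun kv => kv.2) := by
  intro n
  induction n with
  | zero => intro a x h; exact pvEdges_sub g a x h
  | succ n ih =>
    intro a x h
    simp only [pvReachN, List.mem_append, List.mem_flatMap] at h
    rcases h with h | ⟨b, _, hx⟩
    · exact ih a x h
    · exact pvEdges_sub g b x hx

theorem pvReachN_set_mono (g : List (String × List String)) {j k : Nat} (a : String)
    (h : pvReachN g k a ⊆ pvReachN g j a) : pvReachN g (k + 1) a ⊆ pvReachN g (j + 1) a := by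
  intro x hx
  simp only [pvReachN, List.mem_append, List.mem_flatMap] at hx ⊢
  rcases hx with hx | ⟨b, hb, hx⟩
  · exact Or.inl (h hx)
  · exact Or.inr ⟨b, h hb, hx⟩

theorem pvReachN_stab (g : List (String × List String)) (a : String) (n : Nat)
    (h : pvReachN g (n + 1) a ⊆ pvReachN g n a) :
    ∀ k, pvReachN g (n + k) a ⊆ pvReachN g n a := by
  intro k
  induction k with
  | zero => exact fun x hx => hx
  | succ k ih => exact fun x hx => h (pvReachN_set_mono g a ih hx)

theorem pvSat (g : List (String × List String)) (a : String) (n : Nat) :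
    pvReachN g n a ⊆ pvReachN g (g.flatMap (fun kv => kv.2)).length a := by
  set N := (g.flatMap (fun kv => kv.2)).length with hN
  by_cases hstab : ∃ k, k ≤ N ∧ pvReachN g (k + 1) a ⊆ pvReachN g k a
  · obtain ⟨k, hkN, hk⟩ := hstab
    intro x hx
    rcases Nat.le_total n k with hnk | hkn
    · exact pvReachN_le g a hkN (pvReachN_le g a hnk hx)
    · obtain ⟨j, rfl⟩ := Nat.exists_eq_add_of_le hkn
      exact pvReachN_le g a hkN (pvReachN_stab g a k hk j hx)
  · exfalso
    push_neg at hstab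
    have hnew : ∀ k, k ≤ N → ∃ x, x ∈ pvReachN g (k + 1) a ∧ x ∉ pvReachN g k a := by
      intro k hk
      have := hstab k hk
      rw [List.subset_def] at this
      push_neg at this
      exact this
    have hcard : ∀ k, k ≤ N + 1 → k ≤ (pvReachN g k a).toFinset.card := by
      intro k
      induction k with
      | zero => intro _; exact Nat.zero_le _
      | succ k ih =>
        intro hk
        obtain ⟨x, hx1, hx0⟩ := hnew k (by omega)
        have hsub : (pvReachN g k a).toFinset ⊂ (pvReachN g (k + 1) a).toFinset := by
          constructor
          · intro y hy
            rw [List.mem_toFinset] at hy ⊢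
            exact pvReachN_mono_step g k a hy
          · intro hcontra
            exact hx0 (List.mem_toFinset.mp (hcontra (List.mem_toFinset.mpr hx1)))
        have := Finset.card_lt_card hsub
        have := ih (by omega)
        omega
    have hbound : (pvReachN g (N + 1) a).toFinset.card ≤ N := by
      calc (pvReachN g (N + 1) a).toFinset.card
          ≤ (g.flatMap (fun kv => kv.2)).toFinset.card := by
            apply Finset.card_le_card
            intro y hy
            rw [List.mem_toFinset] at hy ⊢
            exact pvReachN_sub_values g (N + 1) a y hy
        _ ≤ N := List.toFinset_card_le _
    have := hcard (N + 1) (Nat.le_refl _)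
    omega

theorem pvPre_acyclic (g : List (String × List String))
    (hpre : Pre_remove_transitive_edges_py g) : pvAcyclic g := by
  intro x hx
  obtain ⟨b, hb, -⟩ := Relation.TransGen.head'_iff.mp hx
  have hne : pvEdges g x ≠ [] := by
    intro h
    rw [pvEdge, h] at hb
    simp at hb
  obtain ⟨kv, hkv, hkx⟩ := pvEdges_key g x hne
  obtain ⟨n, hn⟩ := pvReach_reachN g x x hx
  exact hpre kv hkv (hkx ▸ pvSat g x n hn)

-- ---- counting lemmas ----
theorem pvCnt_le (g : List (String × List String)) (m : PySem.Dict String (PySem.Set String))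
    (S : List String) : pvCnt g m S ≤ g.length := by
  calc pvCnt g m S ≤ ((g.map Prod.fst).dedup).length := List.length_filter_le _ _
    _ ≤ (g.map Prod.fst).length := (List.dedup_sublist _).length_le
    _ = g.length := List.length_map ..

theorem pvCnt_mono_memo (g : List (String × List String))
    {m m' : PySem.Dict String (PySem.Set String)} (S : List String) (h : pvMono m m') :
    pvCnt g m' S ≤ pvCnt g m S := by
  apply List.Sublist.length_le
  apply List.monotone_filter_right
  intro k hk
  simp only [Bool.and_eq_true, Option.isNone_iff_eq_none] at hk ⊢
  refine ⟨?_, hk.2⟩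
  by_contra hcon
  have : (m.get? k).isSome := by
    cases hmk : m.get? k
    · exact absurd hmk hcon
    · simp
  have := h k this
  rw [hk.1] at this
  simp at this

theorem pvCnt_strict (g : List (String × List String)) (m : PySem.Dict String (PySem.Set String))
    (k0 : String) (S : List String) (hk : k0 ∈ g.map Prod.fst) (hnone : m.get? k0 = none)
    (hS : k0 ∉ S) : pvCnt g m (k0 :: S) < pvCnt g m S := by
  have hk0l : k0 ∈ (g.map Prod.fst).dedup := List.mem_dedup.mpr hk
  obtain ⟨s, t, hst⟩ := List.append_of_mem hk0l
  unfold pvCnt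
  rw [hst]
  rw [List.filter_append, List.filter_append, List.filter_cons, List.filter_cons]
  have h1 : ((m.get? k0).isNone && !((k0 :: S).contains k0)) = false := by
    simp
  have h2 : ((m.get? k0).isNone && !(S.contains k0)) = true := by
    simp [hnone, hS]
  rw [h1, h2]
  simp only [Bool.false_eq_true, if_false, if_true, List.length_append, List.length_cons]
  have hmono : ∀ (l : List String),
      (l.filter (fun k => (m.get? k).isNone && !((k0 :: S).contains k))).length ≤
      (l.filter (fun k => (m.get? k).isNone && !(S.contains k))).length := by
    intro l
    apply List.Sublist.length_le
    apply List.monotone_filter_right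
    intro k hkk
    simp only [Bool.and_eq_true, Bool.not_eq_true', List.contains_eq_mem, decide_eq_false_iff_not,
      List.mem_cons, not_or] at hkk ⊢
    exact ⟨hkk.1, hkk.2.2⟩
  have := hmono s
  have := hmono t
  omega

-- ---- memoized helper: cached / insert facts ----
theorem pvAnc_cached (g : List (String × List String)) (fuel : Nat)
    (memo : PySem.Dict String (PySem.Set String)) (node : String) (s : PySem.Set String)
    (h : memo.get? node = some s) : pvAllAncestors g fuel memo node = (s, memo) := by
  cases fuel <;> simp [pvAllAncestors, h]

theorem pvMono_insert (m : PySem.Dict String (PySem.Set String)) (k : String)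
    (v : PySem.Set String) : pvMono m (m.insert k v) := by
  intro k' hk'
  by_cases h : k' = k
  · subst h; rw [PySem.Dict.get?_insert_self]; simp
  · rw [PySem.Dict.get?_insert_of_ne _ _ h]; exact hk'

theorem pvMono_trans {m1 m2 m3 : PySem.Dict String (PySem.Set String)}
    (h1 : pvMono m1 m2) (h2 : pvMono m2 m3) : pvMono m1 m3 :=
  fun k hk => h2 k (h1 k hk)

theorem pvCoh_empty (g : List (String × List String)) : pvCoh g PySem.Dict.empty := by
  intro k s h
  simp [PySem.Dict.get?, PySem.Dict.empty] at h

-- ---- correctness of A's memoized ancestor computation ----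
theorem pvAnc_correct (g : List (String × List String)) (hacyc : pvAcyclic g) :
    ∀ (fuel : Nat) (memo : PySem.Dict String (PySem.Set String)) (node : String)
      (stack : List String),
    pvCoh g memo → (∀ s ∈ stack, pvReach g s node) →
    pvCnt g memo (node :: stack) < fuel →
    (∀ x, x ∈ (pvAllAncestors g fuel memo node).1 ↔ pvReach g node x) ∧
    pvCoh g (pvAllAncestors g fuel memo node).2 ∧
    pvMono memo (pvAllAncestors g fuel memo node).2 := by
  intro fuel
  induction fuel with
  | zero => intro memo node stack _ _ hcnt; omega
  | succ f IH =>
    intro memo node stack hcoh hstack hcnt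
    cases hmem : memo.get? node with
    | some s =>
      rw [pvAnc_cached g _ _ _ _ hmem]
      exact ⟨hcoh node s hmem, hcoh, fun k h => h⟩
    | none =>
      have hunfold : pvAllAncestors g (f + 1) memo node =
          (((pvEdges g node).foldl (pvStepAncFold g f) (PySem.Set.empty, memo)).1,
           ((pvEdges g node).foldl (pvStepAncFold g f) (PySem.Set.empty, memo)).2.insert node
             ((pvEdges g node).foldl (pvStepAncFold g f) (PySem.Set.empty, memo)).1) := by
        simp [pvAllAncestors, hmem]
        exact ⟨rfl, rfl⟩
      have hfold : ∀ (ps : List String), (∀ p ∈ ps, pvEdge g node p) →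
          ∀ (acc : PySem.Set String) (m : PySem.Dict String (PySem.Set String)),
          pvCoh g m → pvCnt g m (node :: stack) ≤ f →
          (∀ x, x ∈ (ps.foldl (pvStepAncFold g f) (acc, m)).1 ↔
            (x ∈ acc ∨ ∃ p ∈ ps, x = p ∨ pvReach g p x)) ∧
          pvCoh g (ps.foldl (pvStepAncFold g f) (acc, m)).2 ∧
          pvMono m (ps.foldl (pvStepAncFold g f) (acc, m)).2 := by
        intro ps
        induction ps with
        | nil =>
          intro _ acc m hm _
          refine ⟨fun x => ?_, hm, fun k h => h⟩
          simp
        | cons p rest IHps =>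
          intro hsub acc m hm hcntm
          have hedge : pvEdge g node p := hsub p (by simp)
          have hpnode : p ≠ node := by
            intro h
            exact hacyc node (Relation.TransGen.single (h ▸ hedge))
          have hpstack : p ∉ stack := by
            intro hin
            exact hacyc p ((hstack p hin).tail hedge)
          -- the single recursive call is correct
          have key3 : (∀ x, x ∈ (pvAllAncestors g f m p).1 ↔ pvReach g p x) ∧
              pvCoh g (pvAllAncestors g f m p).2 ∧ pvMono m (pvAllAncestors g f m p).2 := by
            cases hc : m.get? p with
            | some s =>
              rw [pvAnc_cached g _ _ _ _ hc]
              exact ⟨hm p s hc, hm, fun k h => h⟩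
            | none =>
              by_cases hkey : p ∈ g.map Prod.fst
              · -- uncached key: induction hypothesis on the fuel
                apply IH m p (node :: stack) hm
                · intro s hs
                  rcases List.mem_cons.mp hs with rfl | hs
                  · exact Relation.TransGen.single hedge
                  · exact (hstack s hs).tail hedge
                · have hlt : pvCnt g m (p :: node :: stack) < pvCnt g m (node :: stack) :=
                    pvCnt_strict g m p (node :: stack) hkey hc
                      (by simp [hpnode, hpstack])
                  omega
              · -- uncached non-key: no outgoing edges, compute directly
                have hnk : ∀ kv ∈ g, kv.1 ≠ p := by
                  intro kv hkv h
                  exact hkey (List.mem_map.mpr ⟨kv, hkv, h⟩)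
                have hne : pvEdges g p = [] := pvEdges_of_not_key g p hnk
                have hnr : ∀ x, ¬ pvReach g p x := fun x => pvReach_empty g p x hne
                cases f with
                | zero =>
                  refine ⟨fun x => ?_, ?_, ?_⟩
                  · simp [pvAllAncestors, hc, PySem.Set.empty, hnr x]
                  · simp only [pvAllAncestors, hc]; exact hm
                  · simp only [pvAllAncestors, hc]; exact fun k h => h
                | succ f' =>
                  have heval : pvAllAncestors g (f' + 1) m p =
                      (PySem.Set.empty, m.insert p PySem.Set.empty) := by
                    simp [pvAllAncestors, hc, hne]
                  rw [heval]
                  refine ⟨fun x => ?_, ?_, pvMono_insert m p _⟩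
                  · simp [PySem.Set.empty, hnr x]
                  · intro k s hks x
                    by_cases hkp : k = p
                    · subst hkp
                      rw [PySem.Dict.get?_insert_self] at hks
                      cases hks
                      simp [PySem.Set.empty, hnr x]
                    · rw [PySem.Dict.get?_insert_of_ne _ _ hkp] at hks
                      exact hm k s hks x
          -- one step of the fold, then the list induction hypothesis
          have hstep : (p :: rest).foldl (pvStepAncFold g f) (acc, m) =
              rest.foldl (pvStepAncFold g f)
                (PySem.Set.union (PySem.Set.add acc p) (pvAllAncestors g f m p).1,
                 (pvAllAncestors g f m p).2) := by
            rfl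
          rw [hstep]
          obtain ⟨kmem, kcoh, kmono⟩ := key3
          have hcnt2 : pvCnt g (pvAllAncestors g f m p).2 (node :: stack) ≤ f :=
            le_trans (pvCnt_mono_memo g (node :: stack) kmono) hcntm
          obtain ⟨rmem, rcoh, rmono⟩ := IHps (fun q hq => hsub q (by simp [hq]))
            (PySem.Set.union (PySem.Set.add acc p) (pvAllAncestors g f m p).1)
            (pvAllAncestors g f m p).2 kcoh hcnt2
          refine ⟨fun x => ?_, rcoh, pvMono_trans kmono rmono⟩
          rw [rmem x]
          rw [PySem.Set.mem_union, PySem.Set.mem_add]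
          constructor
          · rintro (((h | h) | h) | ⟨q, hq, h⟩)
            · exact Or.inl h
            · exact Or.inr ⟨p, List.mem_cons_self .., Or.inl h⟩
            · exact Or.inr ⟨p, List.mem_cons_self .., Or.inr ((kmem x).mp h)⟩
            · exact Or.inr ⟨q, List.mem_cons_of_mem p hq, h⟩
          · rintro (h | ⟨q, hq, h⟩)
            · exact Or.inl (Or.inl (Or.inl h))
            · rcases List.mem_cons.mp hq with rfl | hq'
              · rcases h with rfl | h
                · exact Or.inl (Or.inl (Or.inr rfl))
                · exact Or.inl (Or.inr ((kmem x).mpr h))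
              · exact Or.inr ⟨q, hq', h⟩
      -- assemble the successor case
      have hcnt' : pvCnt g memo (node :: stack) ≤ f := by omega
      obtain ⟨fmem, fcoh, fmono⟩ := hfold (pvEdges g node) (fun p hp => hp)
        PySem.Set.empty memo hcoh hcnt'
      rw [hunfold]
      refine ⟨fun x => ?_, ?_, ?_⟩
      · rw [fmem x]
        rw [pvReach_head_iff g node x]
        simp only [PySem.Set.empty]
        constructor
        · rintro (h | ⟨p, hp, h⟩)
          · simp at h
          · exact ⟨p, hp, h⟩
        · rintro ⟨p, hp, h⟩
          exact Or.inr ⟨p, hp, h⟩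
      · intro k s hks x
        by_cases hkn : k = node
        · rw [hkn] at hks ⊢
          rw [PySem.Dict.get?_insert_self] at hks
          cases hks
          rw [fmem x, pvReach_head_iff g node x]
          simp only [PySem.Set.empty]
          constructor
          · rintro (h | ⟨p, hp, h⟩)
            · simp at h
            · exact ⟨p, hp, h⟩
          · rintro ⟨p, hp, h⟩
            exact Or.inr ⟨p, hp, h⟩
        · rw [PySem.Dict.get?_insert_of_ne _ _ hkn] at hks
          exact fcoh k s hks x
      · exact pvMono_trans fmono (pvMono_insert _ node _)

-- A's helper at the fuel the port passes, from any coherent memo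
theorem pvAnc_top (g : List (String × List String)) (hacyc : pvAcyclic g)
    (m : PySem.Dict String (PySem.Set String)) (hcoh : pvCoh g m) (node : String) :
    (∀ x, x ∈ (pvAllAncestors g (g.length + 1) m node).1 ↔ pvReach g node x) ∧
    pvCoh g (pvAllAncestors g (g.length + 1) m node).2 ∧
    pvMono m (pvAllAncestors g (g.length + 1) m node).2 := by
  refine pvAnc_correct g hacyc (g.length + 1) m node [] hcoh (by simp) ?_
  exact Nat.lt_succ_of_le (pvCnt_le g m [node])

-- ---- B's expansion computes bounded reachability ----
theorem pvExpand_mem (g : List (String × List String)) (r : PySem.Set String) (x : String) :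
    x ∈ pvExpand g r ↔ (x ∈ r ∨ ∃ f ∈ r, x ∈ pvEdges g f) := by
  unfold pvExpand
  by_cases h : (PySem.Set.diff (PySem.Set.ofList (r.flatMap (pvEdges g))) r).isEmpty = true
  · rw [if_pos h]
    have hempty := List.isEmpty_iff.mp h
    constructor
    · exact Or.inl
    · rintro (hx | ⟨f, hf, hx⟩)
      · exact hx
      · by_contra hxr
        have : x ∈ PySem.Set.diff (PySem.Set.ofList (r.flatMap (pvEdges g))) r := by
          rw [PySem.Set.mem_diff, PySem.Set.mem_ofList]
          exact ⟨List.mem_flatMap.mpr ⟨f, hf, hx⟩, hxr⟩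
        rw [hempty] at this
        simp at this
  · rw [if_neg h, PySem.Set.mem_union, PySem.Set.mem_diff, PySem.Set.mem_ofList, List.mem_flatMap]
    constructor
    · rintro (hx | ⟨⟨f, hf, hx⟩, -⟩)
      · exact Or.inl hx
      · exact Or.inr ⟨f, hf, hx⟩
    · rintro (hx | ⟨f, hf, hx⟩)
      · exact Or.inl hx
      · by_cases hxr : x ∈ r
        · exact Or.inl hxr
        · exact Or.inr ⟨⟨f, hf, hx⟩, hxr⟩

theorem pvReachFix_mem_reachN (g : List (String × List String)) (q : String) :
    ∀ (i : Nat) (x : String), x ∈ pvReachFix g i q ↔ x ∈ pvReachN g i q := by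
  intro i
  induction i with
  | zero =>
    intro x
    simp [pvReachFix, pvReachN, PySem.Set.mem_ofList]
  | succ i ih =>
    intro x
    have hstep : pvReachFix g (i + 1) q = pvExpand g (pvReachFix g i q) := by
      unfold pvReachFix
      rw [List.range_succ, List.foldl_append]
      rfl
    rw [hstep, pvExpand_mem]
    simp only [pvReachN, List.mem_append, List.mem_flatMap]
    constructor
    · rintro (hx | ⟨f, hf, hx⟩)
      · exact Or.inl ((ih x).mp hx)
      · exact Or.inr ⟨f, (ih f).mp hf, hx⟩
    · rintro (hx | ⟨f, hf, hx⟩)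
      · exact Or.inl ((ih x).mpr hx)
      · exact Or.inr ⟨f, (ih f).mpr hf, hx⟩

-- at the bound B uses (the total edge count), the fixed point is exactly reachability
theorem pvReachFix_mem (g : List (String × List String)) (q x : String) :
    x ∈ pvReachFix g ((g.map (fun kv => kv.2.length)).sum) q ↔ pvReach g q x := by
  have hN : (g.map (fun kv => kv.2.length)).sum = (g.flatMap (fun kv => kv.2)).length := by
    rw [List.length_flatMap]
  rw [pvReachFix_mem_reachN]
  constructor
  · intro h
    exact pvReachN_sound g _ q x h
  · intro h
    obtain ⟨n, hn⟩ := pvReach_reachN g q x h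
    rw [hN]
    exact pvSat g q n hn

-- B's per-node union of reach sets
theorem pvB_implied (g : List (String × List String)) :
    ∀ (qs : List String) (acc : PySem.Set String) (x : String),
    x ∈ qs.foldl (pvStepImpB g ((g.map (fun kv => kv.2.length)).sum)) acc ↔
      (x ∈ acc ∨ ∃ q ∈ qs, pvReach g q x) := by
  intro qs
  induction qs with
  | nil => intro acc x; simp
  | cons q rest ih =>
    intro acc x
    have hstep : (q :: rest).foldl (pvStepImpB g ((g.map (fun kv => kv.2.length)).sum)) acc =
        rest.foldl (pvStepImpB g ((g.map (fun kv => kv.2.length)).sum))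
          (PySem.Set.union acc (pvReachFix g ((g.map (fun kv => kv.2.length)).sum) q)) := rfl
    rw [hstep, ih, PySem.Set.mem_union, pvReachFix_mem]
    constructor
    · rintro ((hx | hx) | ⟨q', hq', hx⟩)
      · exact Or.inl hx
      · exact Or.inr ⟨q, List.mem_cons_self .., hx⟩
      · exact Or.inr ⟨q', List.mem_cons_of_mem q hq', hx⟩
    · rintro (hx | ⟨q', hq', hx⟩)
      · exact Or.inl (Or.inl hx)
      · rcases List.mem_cons.mp hq' with rfl | hq''
        · exact Or.inl (Or.inr hx)
        · exact Or.inr ⟨q', hq'', hx⟩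

-- ---- A's innermost loop: union of ancestor sets of the other prerequisites, each added too ----
theorem pvA_inner (g : List (String × List String)) (hacyc : pvAcyclic g) :
    ∀ (ops : List String) (acc : PySem.Set String) (m : PySem.Dict String (PySem.Set String)),
    pvCoh g m →
    (∀ x, x ∈ (ops.foldl (pvStepInnerA g) (acc, m)).1 ↔
      (x ∈ acc ∨ ∃ op ∈ ops, x = op ∨ pvReach g op x)) ∧
    pvCoh g (ops.foldl (pvStepInnerA g) (acc, m)).2 := by
  intro ops
  induction ops with
  | nil =>
    intro acc m hm
    exact ⟨fun x => by simp, hm⟩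
  | cons op rest ih =>
    intro acc m hm
    obtain ⟨kmem, kcoh, _⟩ := pvAnc_top g hacyc m hm op
    have hstep : (op :: rest).foldl (pvStepInnerA g) (acc, m) =
        rest.foldl (pvStepInnerA g)
          (PySem.Set.add (PySem.Set.union acc (pvAllAncestors g (g.length + 1) m op).1) op,
           (pvAllAncestors g (g.length + 1) m op).2) := rfl
    rw [hstep]
    obtain ⟨rmem, rcoh⟩ := ih _ (pvAllAncestors g (g.length + 1) m op).2 kcoh
    refine ⟨fun x => ?_, rcoh⟩
    rw [rmem x, PySem.Set.mem_add, PySem.Set.mem_union]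
    constructor
    · rintro (((h | h) | h) | ⟨op', hop', h⟩)
      · exact Or.inl h
      · exact Or.inr ⟨op, List.mem_cons_self .., Or.inr ((kmem x).mp h)⟩
      · exact Or.inr ⟨op, List.mem_cons_self .., Or.inl h⟩
      · exact Or.inr ⟨op', List.mem_cons_of_mem op hop', h⟩
    · rintro (h | ⟨op', hop', h⟩)
      · exact Or.inl (Or.inl (Or.inl h))
      · rcases List.mem_cons.mp hop' with rfl | hop''
        · rcases h with rfl | h
          · exact Or.inl (Or.inr rfl)
          · exact Or.inl (Or.inl (Or.inr ((kmem x).mpr h)))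
        · exact Or.inr ⟨op', hop'', h⟩

-- ---- A's middle loop builds exactly the list B filters in one pass ----
theorem pvA_direct (g : List (String × List String)) (hacyc : pvAcyclic g)
    (full : List String) (K : String → Bool)
    (hK : ∀ p, K p = true ↔ ∃ op ∈ full, pvReach g op p) :
    ∀ (ps : List String) (acc : List String) (m : PySem.Dict String (PySem.Set String)),
    pvCoh g m →
    (ps.foldl (pvStepMidA g full) (acc, m)).1 = acc ++ ps.filter (fun p => !(K p)) ∧
    pvCoh g (ps.foldl (pvStepMidA g full) (acc, m)).2 := by
  intro ps
  induction ps with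
  | nil =>
    intro acc m hm
    exact ⟨by simp, hm⟩
  | cons p rest ih =>
    intro acc m hm
    obtain ⟨imem, icoh⟩ := pvA_inner g hacyc (full.filter (fun op => op != p)) PySem.Set.empty m hm
    have hbool : PySem.Set.contains
        ((full.filter (fun op => op != p)).foldl (pvStepInnerA g) (PySem.Set.empty, m)).1 p = K p := by
      cases hKp : K p with
      | true =>
        obtain ⟨op, hop, hreach⟩ := (hK p).mp hKp
        have hopne : op ≠ p := by
          rintro rfl
          exact hacyc op hreach
        rw [PySem.Set.contains_iff]
        rw [imem p]
        refine Or.inr ⟨op, ?_, Or.inr hreach⟩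
        simp [List.mem_filter, hop, hopne]
      | false =>
        by_contra hcon
        rw [Bool.not_eq_false] at hcon
        rw [PySem.Set.contains_iff] at hcon
        rw [imem p] at hcon
        rcases hcon with h | ⟨op, hop, h⟩
        · simp [PySem.Set.empty] at h
        · rw [List.mem_filter] at hop
          have hopne : op ≠ p := by simpa using hop.2
          rcases h with rfl | h
          · exact hopne rfl
          · have : K p = true := (hK p).mpr ⟨op, hop.1, h⟩
            rw [hKp] at this
            simp at this
    have hstep : (p :: rest).foldl (pvStepMidA g full) (acc, m) =
        rest.foldl (pvStepMidA g full)
          ((if PySem.Set.contains ((full.filter (fun op => op != p)).foldl (pvStepInnerA g)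
              (PySem.Set.empty, m)).1 p then acc else acc ++ [p]),
           ((full.filter (fun op => op != p)).foldl (pvStepInnerA g) (PySem.Set.empty, m)).2) := rfl
    rw [hstep, hbool]
    obtain ⟨rlist, rcoh⟩ := ih (if K p then acc else acc ++ [p]) _ icoh
    refine ⟨?_, rcoh⟩
    rw [rlist]
    cases hKp : K p with
    | true => simp [hKp]
    | false => simp [hKp]

-- ---- the outer loops agree: A's cleaned dict equals B's ----
theorem pvOuter (g : List (String × List String)) (hacyc : pvAcyclic g) :
    ∀ (gs : List (String × List String)) (mA : PySem.Dict String (PySem.Set String))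
      (c : PySem.Dict String (List String)),
    pvCoh g mA →
    (gs.foldl (pvStepOuterA g) (mA, c)).2 =
      gs.foldl (pvStepOuterB g ((g.map (fun kv => kv.2.length)).sum)) c := by
  intro gs
  induction gs with
  | nil => intro mA c _; rfl
  | cons kv rest ih =>
    intro mA c hA
    have hK : ∀ p, (PySem.Set.contains
        (kv.2.foldl (pvStepImpB g ((g.map (fun kv => kv.2.length)).sum)) PySem.Set.empty) p) = true ↔
        ∃ op ∈ kv.2, pvReach g op p := by
      intro p
      rw [PySem.Set.contains_iff, pvB_implied g kv.2 PySem.Set.empty p]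
      constructor
      · rintro (h | h)
        · simp [PySem.Set.empty] at h
        · exact h
      · exact Or.inr
    obtain ⟨hdir, icohA⟩ := pvA_direct g hacyc kv.2
      (fun p => PySem.Set.contains
        (kv.2.foldl (pvStepImpB g ((g.map (fun kv => kv.2.length)).sum)) PySem.Set.empty) p) hK
      kv.2 [] mA hA
    have hstepA : (kv :: rest).foldl (pvStepOuterA g) (mA, c) =
        rest.foldl (pvStepOuterA g)
          ((kv.2.foldl (pvStepMidA g kv.2) ([], mA)).2,
           c.insert kv.1 (PySem.List.sorted (kv.2.foldl (pvStepMidA g kv.2) ([], mA)).1 (fun x => x))) := rfl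
    have hstepB : (kv :: rest).foldl (pvStepOuterB g ((g.map (fun kv => kv.2.length)).sum)) c =
        rest.foldl (pvStepOuterB g ((g.map (fun kv => kv.2.length)).sum))
          (c.insert kv.1 (PySem.List.sorted
            (kv.2.filter (fun p => !(PySem.Set.contains
              (kv.2.foldl (pvStepImpB g ((g.map (fun kv => kv.2.length)).sum)) PySem.Set.empty) p)))
            (fun x => x))) := rfl
    rw [hstepA, hstepB, hdir]
    simp only [List.nil_append]
    exact ih _ _ icohA

-- ===== VERDICT (by name: the statement is the Claim_ definition above) =====
theorem remove_transitive_edges_py_spec : Claim_equal_remove_transitive_edges_py := by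
  intro g _ hpre
  have hacyc : pvAcyclic g := pvPre_acyclic g hpre
  show remove_transitive_edges_py g = remove_transitive_edges_py_alt g
  exact congrArg (fun d => PySem.Dict.items d)
    (pvOuter g hacyc g PySem.Dict.empty PySem.Dict.empty (pvCoh_empty g))
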